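-- pv_equiv track=rewrite | github.com/carrtesy/CodingTest_python | bkj/b14889/sol.py | calc
-- ===== SOURCE A (Python) =====
-- def calc(v, arr):
--   start = [i for i in range(len(v)) if v[i]==0]
--   link = [i for i in range(len(v)) if v[i]==1]
--   a = 0
--   for i in start:
--     for j in start:
--       a += arr[i][j]
--
--   b = 0
--   for i in link:
--     for j in link:
--       b += arr[i][j]
--   return abs(a-b)
-- ===== SOURCE B (Python) =====
-- def calc(v, arr):
--   n = len(v)
--   # restricted column sums: s0[j] = sum of row j-entries over team-0 rows, s1 likewise for team 1
--   s0 = [0] * n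
--   s1 = [0] * n
--   for t, row in zip(v, arr):
--     if t == 0:
--       for j, x in enumerate(row[:n]):
--         s0[j] += x
--     elif t == 1:
--       for j, x in enumerate(row[:n]):
--         s1[j] += x
--   # signed reduction of the two column-sum vectors
--   d = 0
--   for j, t in enumerate(v):
--     if t == 0:
--       d += s0[j]
--     elif t == 1:
--       d -= s1[j]
--   return abs(d)
-- ===== Notes on version B (the rewrite author's own statement) =====
-- stated objective: alternative
-- what changed: Instead of two quadruple filtered double loops over index subsets, B makes a row pass that accumulates two team-restricted column-sum vectors and then a single signed linear reduction of these vectors, so the matrix is traversed row-wise once and the final pass is linear.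
import Mathlib
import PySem

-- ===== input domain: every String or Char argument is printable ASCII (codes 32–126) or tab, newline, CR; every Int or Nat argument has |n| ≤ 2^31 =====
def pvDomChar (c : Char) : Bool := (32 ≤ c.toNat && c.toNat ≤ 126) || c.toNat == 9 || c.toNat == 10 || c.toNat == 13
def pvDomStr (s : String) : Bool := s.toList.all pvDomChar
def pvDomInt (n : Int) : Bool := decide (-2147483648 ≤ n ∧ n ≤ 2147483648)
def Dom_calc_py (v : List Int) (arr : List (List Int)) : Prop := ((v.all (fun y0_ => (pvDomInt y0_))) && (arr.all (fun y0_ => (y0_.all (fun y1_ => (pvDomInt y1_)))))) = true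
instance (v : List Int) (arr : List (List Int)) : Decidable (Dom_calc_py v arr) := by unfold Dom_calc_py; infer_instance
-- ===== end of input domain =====

-- B replaces A's two filtered-index-subset double loops by a row-wise pass that builds
-- two team-restricted column-sum vectors followed by one signed linear reduction; objective: alternative.

-- ===== PORT A =====
def calc_py (v : List Int) (arr : List (List Int)) : Int :=
  let start := (List.range v.length).filter (fun i => v.getD i 0 == 0)
  let link  := (List.range v.length).filter (fun i => v.getD i 0 == 1)
  let a := start.foldl (fun a i => start.foldl (fun a j => a + (arr.getD i []).getD j 0) a) 0
  let b := link.foldl  (fun b i => link.foldl  (fun b j => b + (arr.getD i []).getD j 0) b) 0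
  |a - b|

-- ===== PORT B =====
-- 'for j, x in enumerate(row): s[j] += x' as a counter-carrying fold (the index stays
-- in range, so getD/set are exact there)
def pvAddRow (s row : List Int) : List Int :=
  (row.foldl (fun (p : List Int × Nat) x => (p.1.set p.2 (p.1.getD p.2 0 + x), p.2 + 1)) (s, 0)).1

def calc_py_alt (v : List Int) (arr : List (List Int)) : Int :=
  let n := v.length
  -- first pass: team-restricted column-sum vectors (row[:n] = take n, slice with nonnegative stop)
  let s := (v.zip arr).foldl (fun (s : List Int × List Int) p =>
      if p.1 = 0 then (pvAddRow s.1 (p.2.take n), s.2)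
      else if p.1 = 1 then (s.1, pvAddRow s.2 (p.2.take n))
      else s)
    (List.replicate n 0, List.replicate n 0)
  -- second pass: signed reduction, 'for j, t in enumerate(v)' as a counter-carrying fold
  let d := (v.foldl (fun (p : Int × Nat) t =>
      (if t = 0 then p.1 + s.1.getD p.2 0 else if t = 1 then p.1 - s.2.getD p.2 0 else p.1, p.2 + 1))
    ((0 : Int), (0 : Nat))).1
  |d|

-- ===== PRECONDITION & SPEC =====
-- A indexes arr[i][j] exactly at same-team pairs (i,j); exactly there the indices must be
-- in range, else the Python A raises IndexError.
def Pre_calc_py (v : List Int) (arr : List (List Int)) : Prop :=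
  ∀ i ∈ List.range v.length, ∀ j ∈ List.range v.length,
    ((v.getD i 0 = 0 ∧ v.getD j 0 = 0) ∨ (v.getD i 0 = 1 ∧ v.getD j 0 = 1)) →
    i < arr.length ∧ j < (arr.getD i []).length
instance (v : List Int) (arr : List (List Int)) : Decidable (Pre_calc_py v arr) := by
  unfold Pre_calc_py; infer_instance
def pvWitness_calc_py : List Int × List (List Int) :=
  ([0, 1, 0, 1], [[0, 1, 2, 3], [1, 0, 4, 5], [2, 4, 0, 6], [3, 5, 6, 0]])

def Spec_calc_py (v : List Int) (arr : List (List Int)) (out : Int) : Prop := out = calc_py_alt v arr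
instance (v : List Int) (arr : List (List Int)) (out : Int) : Decidable (Spec_calc_py v arr out) := by unfold Spec_calc_py; infer_instance

-- ===== CLAIM (what is proved, stated in full; the proofs are below) =====
def Claim_equal_calc_py : Prop := ∀ (v : List Int) (arr : List (List Int)), Dom_calc_py v arr → Pre_calc_py v arr → Spec_calc_py v arr (calc_py v arr)

-- ===== LEMMAS AND PROOFS =====

-- list sum over range = Finset sum over range
theorem pv_range_sum (n : ℕ) (f : ℕ → Int) :
    ((List.range n).map f).sum = ∑ i ∈ Finset.range n, f i := by
  induction n with
  | zero => simp
  | succ m ih => rw [List.range_succ, Finset.sum_range_succ]; simp [ih]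

-- foldl-add is an initial value plus a sum
theorem pv_foldl_add {α : Type} (l : List α) (f : α → Int) (a : Int) :
    l.foldl (fun a j => a + f j) a = a + (l.map f).sum := by
  induction l generalizing a with
  | nil => simp
  | cons x xs ih => simp [List.foldl_cons, ih]; ring

-- sum over a filtered list = sum with an if over the whole list
theorem pv_sum_filter {α : Type} (l : List α) (p : α → Bool) (f : α → Int) :
    ((l.filter p).map f).sum = (l.map (fun j => if p j = true then f j else 0)).sum := by
  induction l with
  | nil => simp
  | cons x xs ih => by_cases h : p x = true <;> simp [h, ih]

-- A's filtered double loop as a double Finset sum with a conjunctive guard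
theorem pv_A_sum (v : List Int) (arr : List (List Int)) (c : Int) :
    ((List.range v.length).filter (fun i => v.getD i 0 == c)).foldl
      (fun a i => ((List.range v.length).filter (fun i => v.getD i 0 == c)).foldl
        (fun a j => a + (arr.getD i []).getD j 0) a) 0
    = ∑ i ∈ Finset.range v.length, ∑ j ∈ Finset.range v.length,
        (if v.getD i 0 = c ∧ v.getD j 0 = c then (arr.getD i []).getD j 0 else 0) := by
  have hinner : (fun (a : Int) i =>
      ((List.range v.length).filter (fun i => v.getD i 0 == c)).foldl
        (fun a j => a + (arr.getD i []).getD j 0) a)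
      = fun (a : Int) i =>
        a + (((List.range v.length).filter (fun i => v.getD i 0 == c)).map
          (fun j => (arr.getD i []).getD j 0)).sum := by
    funext a i; rw [pv_foldl_add]
  rw [hinner, pv_foldl_add, pv_sum_filter, zero_add]
  rw [← pv_range_sum]
  congr 1
  apply List.map_congr_left
  intro i _
  rw [pv_sum_filter (f := fun j => (arr.getD i []).getD j 0)]
  by_cases h : v.getD i 0 = c
  · rw [if_pos (show (v.getD i 0 == c) = true by simp only [List.getD] at h; simp [h])]
    rw [← pv_range_sum]
    apply congrArg
    apply List.map_congr_left
    intro j _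
    simp only [List.getD] at h
    simp [h]
  · rw [if_neg (show ¬ (v.getD i 0 == c) = true by simp only [List.getD] at h; simp [h])]
    symm
    apply Finset.sum_eq_zero
    intro j _
    simp only [List.getD] at h
    simp [h]

theorem pv_getD_replicate (n j : ℕ) : (List.replicate n (0 : Int)).getD j 0 = 0 := by
  simp [List.getD, List.getElem?_replicate]
  split <;> simp

-- the counter fold of pvAddRow: length is preserved
theorem pv_addRowAux_length (row : List Int) (s : List Int) (k : ℕ) :
    ((row.foldl (fun (p : List Int × Nat) x => (p.1.set p.2 (p.1.getD p.2 0 + x), p.2 + 1)) (s, k)).1).length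
      = s.length := by
  induction row generalizing s k with
  | nil => rfl
  | cons x xs ih => simpa using ih (s.set k (s.getD k 0 + x)) (k + 1)

-- the counter fold of pvAddRow, pointwise
theorem pv_addRowAux_getD (row : List Int) (s : List Int) (k j : ℕ)
    (h : k + row.length ≤ s.length) :
    ((row.foldl (fun (p : List Int × Nat) x => (p.1.set p.2 (p.1.getD p.2 0 + x), p.2 + 1)) (s, k)).1).getD j 0
      = s.getD j 0 + (if k ≤ j ∧ j < k + row.length then row.getD (j - k) 0 else 0) := by
  induction row generalizing s k with
  | nil => simp
  | cons x xs ih =>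
    have hk : k < s.length := by simp at h; omega
    have hlen : (k + 1) + xs.length ≤ (s.set k (s.getD k 0 + x)).length := by
      simp at h ⊢; omega
    rw [List.foldl_cons]
    rw [ih (s.set k (s.getD k 0 + x)) (k + 1) hlen]
    have hset : ∀ (m : ℕ), (s.set k (s.getD k 0 + x)).getD m 0
        = if m = k then s.getD k 0 + x else s.getD m 0 := by
      intro m
      by_cases hm : m = k
      · subst hm; simp [List.getD, List.getElem?_set, hk]
      · simp [List.getD, List.getElem?_set, hm, Ne.symm hm]
    rw [hset j]
    by_cases hjk : j = k
    · subst hjk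
      rw [if_neg (show ¬(j + 1 ≤ j ∧ j < j + 1 + xs.length) by omega)]
      rw [if_pos (show j ≤ j ∧ j < j + (x :: xs).length by simp only [List.length_cons]; omega)]
      simp
    · rw [if_neg hjk]
      by_cases hc : (k + 1 ≤ j ∧ j < k + 1 + xs.length)
      · have hc' : k ≤ j ∧ j < k + (x :: xs).length := by
          simp only [List.length_cons]; omega
        rw [if_pos hc, if_pos hc']
        have hjkk : j - k = (j - (k + 1)) + 1 := by omega
        rw [hjkk, List.getD_cons_succ]
      · have hc' : ¬ (k ≤ j ∧ j < k + (x :: xs).length) := by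
          simp only [List.length_cons]; omega
        rw [if_neg hc, if_neg hc']

theorem pv_addRow_length (s row : List Int) : (pvAddRow s row).length = s.length :=
  pv_addRowAux_length row s 0

theorem pv_addRow_getD (s row : List Int) (j : ℕ) (h : row.length ≤ s.length) :
    (pvAddRow s row).getD j 0
      = s.getD j 0 + (if j < row.length then row.getD j 0 else 0) := by
  unfold pvAddRow
  rw [pv_addRowAux_getD row s 0 j (by omega)]
  simp

-- first pass: the final column-sum vectors, pointwise
theorem pv_pass1 (n : ℕ) (l : List (Int × List Int)) (s0 s1 : List Int)
    (h0 : s0.length = n) (h1 : s1.length = n) :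
    (let r := l.foldl (fun (s : List Int × List Int) p =>
        if p.1 = 0 then (pvAddRow s.1 (p.2.take n), s.2)
        else if p.1 = 1 then (s.1, pvAddRow s.2 (p.2.take n))
        else s) (s0, s1)
     (r.1.length = n ∧ r.2.length = n) ∧ ∀ j : ℕ,
       r.1.getD j 0 = s0.getD j 0
         + (l.map (fun p => if p.1 = 0 ∧ j < (p.2.take n).length then (p.2.take n).getD j 0 else 0)).sum
       ∧ r.2.getD j 0 = s1.getD j 0
         + (l.map (fun p => if p.1 = 1 ∧ j < (p.2.take n).length then (p.2.take n).getD j 0 else 0)).sum) := by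
  induction l generalizing s0 s1 with
  | nil => simp [h0, h1]
  | cons p ps ih =>
    simp only [List.foldl_cons]
    by_cases hp0 : p.1 = 0
    · rw [if_pos hp0]
      have hlen : (pvAddRow s0 (p.2.take n)).length = n := by rw [pv_addRow_length]; exact h0
      have hih := ih (pvAddRow s0 (p.2.take n)) s1 hlen h1
      refine ⟨hih.1, fun j => ?_⟩
      have hj := hih.2 j
      refine ⟨?_, ?_⟩
      · rw [hj.1, pv_addRow_getD s0 (p.2.take n) j (by rw [h0]; simp)]
        simp [hp0]
        ring
      · rw [hj.2]
        have h01 : p.1 ≠ 1 := by rw [hp0]; decide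
        simp [h01]
    · rw [if_neg hp0]
      by_cases hp1 : p.1 = 1
      · rw [if_pos hp1]
        have hlen : (pvAddRow s1 (p.2.take n)).length = n := by rw [pv_addRow_length]; exact h1
        have hih := ih s0 (pvAddRow s1 (p.2.take n)) h0 hlen
        refine ⟨hih.1, fun j => ?_⟩
        have hj := hih.2 j
        refine ⟨?_, ?_⟩
        · rw [hj.1]; simp [hp0]
        · rw [hj.2, pv_addRow_getD s1 (p.2.take n) j (by rw [h1]; simp)]
          simp [hp1]
          ring
      · rw [if_neg hp1]
        have hih := ih s0 s1 h0 h1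
        refine ⟨hih.1, fun j => ?_⟩
        have hj := hih.2 j
        exact ⟨by rw [hj.1]; simp [hp0], by rw [hj.2]; simp [hp1]⟩

-- second pass: the signed reduction as a sum
theorem pv_pass2 (s0 s1 : List Int) (w : List Int) (d : Int) (k : ℕ) :
    (w.foldl (fun (p : Int × Nat) t =>
        (if t = 0 then p.1 + s0.getD p.2 0 else if t = 1 then p.1 - s1.getD p.2 0 else p.1, p.2 + 1))
      (d, k)).1
    = d + ∑ i ∈ Finset.range w.length,
        (if w.getD i 0 = 0 then s0.getD (k + i) 0
         else if w.getD i 0 = 1 then -(s1.getD (k + i) 0) else 0) := by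
  induction w generalizing d k with
  | nil => simp
  | cons t ts ih =>
    rw [List.foldl_cons, ih, List.length_cons, Finset.sum_range_succ']
    have hsh : ∑ i ∈ Finset.range ts.length,
        (if (t :: ts).getD (i + 1) 0 = 0 then s0.getD (k + (i + 1)) 0
         else if (t :: ts).getD (i + 1) 0 = 1 then -(s1.getD (k + (i + 1)) 0) else 0)
      = ∑ i ∈ Finset.range ts.length,
        (if ts.getD i 0 = 0 then s0.getD ((k + 1) + i) 0
         else if ts.getD i 0 = 1 then -(s1.getD ((k + 1) + i) 0) else 0) := by
      apply Finset.sum_congr rfl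
      intro i _
      have hki : k + (i + 1) = (k + 1) + i := by omega
      rw [List.getD_cons_succ, hki]
    rw [hsh]
    simp only [List.getD_cons_zero, Nat.add_zero]
    by_cases ht0 : t = 0
    · simp [ht0]; ring
    · by_cases ht1 : t = 1
      · simp [ht0, ht1]; ring
      · simp [ht0, ht1]

-- zip sum as an indexed Finset sum over the common prefix
theorem pv_zip_sum (v : List Int) (arr : List (List Int)) (f : Int × List Int → Int) :
    ((v.zip arr).map f).sum
      = ∑ i ∈ Finset.range (min v.length arr.length), f (v.getD i 0, arr.getD i []) := by
  induction v generalizing arr with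
  | nil => simp
  | cons x xs ih =>
    cases arr with
    | nil => simp
    | cons y ys =>
      simp only [List.zip_cons_cons, List.map_cons, List.sum_cons, ih ys]
      have hmin : min (x :: xs).length (y :: ys).length = (min xs.length ys.length) + 1 := by
        simp only [List.length_cons]; omega
      rw [hmin, Finset.sum_range_succ']
      have hsh : ∑ i ∈ Finset.range (min xs.length ys.length),
          f ((x :: xs).getD (i + 1) 0, (y :: ys).getD (i + 1) []) 
        = ∑ i ∈ Finset.range (min xs.length ys.length), f (xs.getD i 0, ys.getD i []) := by
      
        apply Finset.sum_congr rfl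
        intro i _
        rw [List.getD_cons_succ, List.getD_cons_succ]
      rw [hsh]
      simp [add_comm]

-- ===== the main equality =====
theorem calc_py_eq_alt (v : List Int) (arr : List (List Int)) (hpre : Pre_calc_py v arr) :
    calc_py v arr = calc_py_alt v arr := by
  have hpre' : ∀ i j : ℕ, i < v.length → j < v.length →
      ((v.getD i 0 = 0 ∧ v.getD j 0 = 0) ∨ (v.getD i 0 = 1 ∧ v.getD j 0 = 1)) →
      i < arr.length ∧ j < (arr.getD i []).length := by
    intro i j hi hj h
    exact hpre i (List.mem_range.mpr hi) j (List.mem_range.mpr hj) h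
  unfold calc_py calc_py_alt
  simp only
  rw [pv_A_sum v arr 0, pv_A_sum v arr 1]
  have hp1 := pv_pass1 v.length (v.zip arr) (List.replicate v.length 0) (List.replicate v.length 0)
    (List.length_replicate) (List.length_replicate)
  simp only at hp1
  set r := (v.zip arr).foldl (fun (s : List Int × List Int) p =>
      if p.1 = 0 then (pvAddRow s.1 (p.2.take v.length), s.2)
      else if p.1 = 1 then (s.1, pvAddRow s.2 (p.2.take v.length))
      else s) (List.replicate v.length 0, List.replicate v.length 0) with hr
  rw [pv_pass2 r.1 r.2 v 0 0]
  simp only [zero_add, Nat.zero_add]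
  -- the per-column characterisation of the first pass, under Pre_
  have hS1 : ∀ j : ℕ, r.1.getD j 0
      = ((v.zip arr).map (fun p => if p.1 = 0 ∧ j < (p.2.take v.length).length then (p.2.take v.length).getD j 0 else 0)).sum := by
    intro j
    have := (hp1.2 j).1
    rw [this, pv_getD_replicate, zero_add]
  have hS2 : ∀ j : ℕ, r.2.getD j 0
      = ((v.zip arr).map (fun p => if p.1 = 1 ∧ j < (p.2.take v.length).length then (p.2.take v.length).getD j 0 else 0)).sum := by
    intro j
    have := (hp1.2 j).2
    rw [this, pv_getD_replicate, zero_add]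
  have hcol : ∀ c : Int, (c = 0 ∨ c = 1) → ∀ j : ℕ, j < v.length → v.getD j 0 = c →
      ((v.zip arr).map (fun p => if p.1 = c ∧ j < (p.2.take v.length).length then (p.2.take v.length).getD j 0 else 0)).sum
        = ∑ i ∈ Finset.range v.length, (if v.getD i 0 = c ∧ v.getD j 0 = c then (arr.getD i []).getD j 0 else 0) := by
    intro c hc j hj hvj
    rw [pv_zip_sum]
    have hsub : Finset.range (min v.length arr.length) ⊆ Finset.range v.length := by
      intro x hx
      rw [Finset.mem_range] at hx ⊢
      omega
    rw [Finset.sum_subset hsub]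
    · apply Finset.sum_congr rfl
      intro i hi
      have hi' : i < v.length := Finset.mem_range.mp hi
      by_cases hvi : v.getD i 0 = c
      · have hd : (v.getD i 0 = 0 ∧ v.getD j 0 = 0) ∨ (v.getD i 0 = 1 ∧ v.getD j 0 = 1) := by
          rcases hc with hc | hc <;> subst hc
          · exact Or.inl ⟨hvi, hvj⟩
          · exact Or.inr ⟨hvi, hvj⟩
        have hij := hpre' i j hi' hj hd
        have hjlen : j < (arr.getD i []).length := hij.2
        have hcond : j < ((arr.getD i []).take v.length).length := by
          rw [List.length_take]; omega
        rw [if_pos ⟨hvi, hcond⟩, if_pos ⟨hvi, hvj⟩]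
        have htake : ((arr.getD i []).take v.length).getD j 0 = (arr.getD i []).getD j 0 := by
          simp [List.getD, List.getElem?_take, hj]
        exact htake
      · rw [if_neg (by tauto), if_neg (by tauto)]
    · intro i hi hni
      have hi' : i < v.length := Finset.mem_range.mp hi
      have hia : ¬ i < min v.length arr.length := fun h => hni (Finset.mem_range.mpr h)
      have hvi : v.getD i 0 ≠ c := by
        intro hvi
        have hd : (v.getD i 0 = 0 ∧ v.getD j 0 = 0) ∨ (v.getD i 0 = 1 ∧ v.getD j 0 = 1) := by
          rcases hc with hc | hc <;> subst hc
          · exact Or.inl ⟨hvi, hvj⟩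
          · exact Or.inr ⟨hvi, hvj⟩
        have := (hpre' i j hi' hj hd).1
        omega
      rw [if_neg (by tauto)]
  -- split the signed reduction into the two team sums and swap the summation order
  have hsplit : ∑ j ∈ Finset.range v.length, (if v.getD j 0 = 0 then r.1.getD j 0
        else if v.getD j 0 = 1 then -(r.2.getD j 0) else 0)
      = (∑ j ∈ Finset.range v.length, ∑ i ∈ Finset.range v.length,
          (if v.getD i 0 = 0 ∧ v.getD j 0 = 0 then (arr.getD i []).getD j 0 else 0))
        - (∑ j ∈ Finset.range v.length, ∑ i ∈ Finset.range v.length,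
          (if v.getD i 0 = 1 ∧ v.getD j 0 = 1 then (arr.getD i []).getD j 0 else 0)) := by
    rw [← Finset.sum_sub_distrib]
    apply Finset.sum_congr rfl
    intro j hjm
    have hj : j < v.length := Finset.mem_range.mp hjm
    by_cases h0 : v.getD j 0 = 0
    · have h1 : v.getD j 0 ≠ 1 := by rw [h0]; decide
      rw [if_pos h0, hS1 j, hcol 0 (Or.inl rfl) j hj h0]
      have hz : ∑ i ∈ Finset.range v.length, (if v.getD i 0 = 1 ∧ v.getD j 0 = 1 then (arr.getD i []).getD j 0 else 0) = 0 := by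
        apply Finset.sum_eq_zero; intro i _; rw [if_neg (by tauto)]
      rw [hz]; ring
    · by_cases h1 : v.getD j 0 = 1
      · rw [if_neg h0, if_pos h1, hS2 j, hcol 1 (Or.inr rfl) j hj h1]
        have hz : ∑ i ∈ Finset.range v.length, (if v.getD i 0 = 0 ∧ v.getD j 0 = 0 then (arr.getD i []).getD j 0 else 0) = 0 := by
          apply Finset.sum_eq_zero; intro i _; rw [if_neg (by tauto)]
        rw [hz]; ring
      · rw [if_neg h0, if_neg h1]
        have hz0 : ∑ i ∈ Finset.range v.length, (if v.getD i 0 = 0 ∧ v.getD j 0 = 0 then (arr.getD i []).getD j 0 else 0) = 0 := by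
          apply Finset.sum_eq_zero; intro i _; rw [if_neg (by tauto)]
        have hz1 : ∑ i ∈ Finset.range v.length, (if v.getD i 0 = 1 ∧ v.getD j 0 = 1 then (arr.getD i []).getD j 0 else 0) = 0 := by
          apply Finset.sum_eq_zero; intro i _; rw [if_neg (by tauto)]
        rw [hz0, hz1]; ring
  rw [hsplit]
  rw [Finset.sum_comm (s := Finset.range v.length) (t := Finset.range v.length)
    (f := fun j i => (if v.getD i 0 = 0 ∧ v.getD j 0 = 0 then (arr.getD i []).getD j 0 else 0))]
  rw [Finset.sum_comm (s := Finset.range v.length) (t := Finset.range v.length)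
    (f := fun j i => (if v.getD i 0 = 1 ∧ v.getD j 0 = 1 then (arr.getD i []).getD j 0 else 0))]

-- ===== VERDICT (by name: the statement is the Claim_ definition above) =====
theorem calc_py_spec : Claim_equal_calc_py := by
  intro v arr _ hpre
  unfold Spec_calc_py
  exact calc_py_eq_alt v arr hpre
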